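-- pv_equiv track=rewrite | github.com/umarprogrammer19/Digital-Pakistan-Speed-Programming-Competition-DPSPC | ONLINE_QUALIFIERS_ROUND_2/6_HOHO.py | min_hops
-- ===== SOURCE A (Python) =====
-- from collections import defaultdict, deque
--
-- def min_hops(n, routes, source, destination):
--     stop_to_routes = defaultdict(set)
--
--     for i, route in enumerate(routes):
--         for stop in route:
--             stop_to_routes[stop].add(i)
--
--     if source == destination:
--         return 0
--
--     graph = defaultdict(set)
--     for stop, route_set in stop_to_routes.items():
--         route_list = list(route_set)
--         for i in range(len(route_list)):
--             for j in range(i + 1, len(route_list)):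
--                 a, b = route_list[i], route_list[j]
--                 graph[a].add(b)
--                 graph[b].add(a)
--
--     source_routes = stop_to_routes.get(source, set())
--     dest_routes = stop_to_routes.get(destination, set())
--
--     if not source_routes or not dest_routes:
--         return -1
--
--     visited = set()
--     queue = deque()
--
--     for r in source_routes:
--         queue.append((r, 1))
--         visited.add(r)
--
--     while queue:
--         current_route, hops = queue.popleft()
--         if current_route in dest_routes:
--             return hops
--
--         for neighbor in graph[current_route]:
--             if neighbor not in visited:
--                 visited.add(neighbor)
--                 queue.append((neighbor, hops + 1))
--
--     return -1
-- ===== SOURCE B (Python) =====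
-- def min_hops(n, routes, source, destination):
--     if source == destination:
--         return 0
--     stop_to_routes = {}
--     for i, route in enumerate(routes):
--         for stop in route:
--             stop_to_routes.setdefault(stop, []).append(i)
--     src = stop_to_routes.get(source, [])
--     dst = stop_to_routes.get(destination, [])
--     if not src or not dst:
--         return -1
--     dst_set = set(dst)
--     visited = set()
--     frontier = []
--     for r in src:
--         if r not in visited:
--             visited.add(r)
--             frontier.append(r)
--     hops = 1
--     while frontier:
--         if any(r in dst_set for r in frontier):
--             return hops
--         nxt = []
--         for r in frontier:
--             for stop in routes[r]:
--                 for r2 in stop_to_routes[stop]: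
--                     if r2 not in visited:
--                         visited.add(r2)
--                         nxt.append(r2)
--         frontier = nxt
--         hops += 1
--     return -1
-- ===== Notes on version B (the rewrite author's own statement) =====
-- stated objective: faster
-- what changed: B never materialises the pairwise route-route edge set; it does a level-by-level BFS over route indices, expanding a frontier route directly through the stop->routes index, with a visited-route set.
import Mathlib
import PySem

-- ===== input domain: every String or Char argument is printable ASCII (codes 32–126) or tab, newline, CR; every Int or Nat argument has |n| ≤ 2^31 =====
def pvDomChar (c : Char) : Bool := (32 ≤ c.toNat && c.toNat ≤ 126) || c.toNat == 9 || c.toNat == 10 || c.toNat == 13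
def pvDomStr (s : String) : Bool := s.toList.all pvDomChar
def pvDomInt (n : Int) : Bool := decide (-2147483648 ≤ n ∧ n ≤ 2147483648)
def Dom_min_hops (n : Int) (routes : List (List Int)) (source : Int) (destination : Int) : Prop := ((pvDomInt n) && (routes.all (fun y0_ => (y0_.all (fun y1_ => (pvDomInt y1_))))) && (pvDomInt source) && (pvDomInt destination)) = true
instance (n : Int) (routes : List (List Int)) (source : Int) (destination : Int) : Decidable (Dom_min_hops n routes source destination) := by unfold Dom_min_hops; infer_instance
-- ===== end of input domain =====

-- B replaces A's quadratic pairwise route-route edge construction by a level-by-level BFS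
-- over route indices expanded directly through the stop->routes index (objective: faster).

-- ===== PORT A =====
-- stop_to_routes : defaultdict(set) built from enumerate(routes)
def pvBuildStr (routes : List (List Int)) : PySem.Dict Int (PySem.Set Int) :=
  (PySem.List.enumerate routes 0).foldl
    (fun d p => p.2.foldl
      (fun d stop => PySem.Dict.modify d stop PySem.Set.empty (fun t => PySem.Set.add t p.1)) d)
    PySem.Dict.empty

-- graph : defaultdict(set), pairwise edges between routes sharing a stop
def pvBuildGraph (str : PySem.Dict Int (PySem.Set Int)) : PySem.Dict Int (PySem.Set Int) :=
  str.items.foldl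
    (fun g pr =>
      (PySem.List.pyRange 0 (pr.2.length : Int) 1).foldl
        (fun g i =>
          (PySem.List.pyRange (i + 1) (pr.2.length : Int) 1).foldl
            (fun g j =>
              let a := PySem.List.pyGetD pr.2 i 0
              let b := PySem.List.pyGetD pr.2 j 0
              PySem.Dict.modify (PySem.Dict.modify g a PySem.Set.empty (fun t => PySem.Set.add t b))
                b PySem.Set.empty (fun t => PySem.Set.add t a)) g) g)
    PySem.Dict.empty

-- the while-queue BFS loop; fuel is a totality guard only (routes.length+1 provably suffices)
def pvBfsA (graph : PySem.Dict Int (PySem.Set Int)) (destRoutes : PySem.Set Int) :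
    Nat → List (Int × Int) → PySem.Set Int → Int
  | 0, _, _ => -1
  | _ + 1, [], _ => -1
  | fuel + 1, (cur, hops) :: queue, visited =>
    if PySem.Set.contains destRoutes cur then hops
    else
      let st := (PySem.Dict.getD graph cur PySem.Set.empty).foldl
        (fun (s : List (Int × Int) × PySem.Set Int) nb =>
          if PySem.Set.contains s.2 nb then s
          else (s.1 ++ [(nb, hops + 1)], PySem.Set.add s.2 nb))
        (queue, visited)
      pvBfsA graph destRoutes fuel st.1 st.2

def min_hops (n : Int) (routes : List (List Int)) (source : Int) (destination : Int) : Int :=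
  let str := pvBuildStr routes
  if source = destination then 0
  else
    let graph := pvBuildGraph str
    let source_routes := PySem.Dict.getD str source PySem.Set.empty
    let dest_routes := PySem.Dict.getD str destination PySem.Set.empty
    if source_routes.isEmpty || dest_routes.isEmpty then -1
    else
      let init := source_routes.foldl
        (fun (s : List (Int × Int) × PySem.Set Int) r =>
          (s.1 ++ [(r, 1)], PySem.Set.add s.2 r)) ([], PySem.Set.empty)
      pvBfsA graph dest_routes (routes.length + 1) init.1 init.2

-- ===== PORT B =====
-- stop_to_routes : dict of lists (setdefault(stop, []).append(i))
def pvBuildStrB (routes : List (List Int)) : PySem.Dict Int (List Int) :=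
  (PySem.List.enumerate routes 0).foldl
    (fun d p => p.2.foldl
      (fun d stop => PySem.Dict.modify d stop [] (fun l => l ++ [p.1])) d)
    PySem.Dict.empty

-- the while-frontier level BFS; fuel is a totality guard only (routes.length+2 provably suffices)
def pvBfsB (routes : List (List Int)) (str : PySem.Dict Int (List Int)) (dstSet : PySem.Set Int) :
    Nat → List Int → PySem.Set Int → Int → Int
  | 0, _, _, _ => -1
  | fuel + 1, frontier, visited, hops =>
    if frontier.isEmpty then -1
    else if frontier.any (fun r => PySem.Set.contains dstSet r) then hops
    else
      let st := frontier.foldl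
        (fun (s : List Int × PySem.Set Int) r =>
          (PySem.List.pyGetD routes r []).foldl
            (fun (s : List Int × PySem.Set Int) stop =>
              (PySem.Dict.getD str stop []).foldl
                (fun (s : List Int × PySem.Set Int) r2 =>
                  if PySem.Set.contains s.2 r2 then s
                  else (s.1 ++ [r2], PySem.Set.add s.2 r2)) s) s)
        ([], visited)
      pvBfsB routes str dstSet fuel st.1 st.2 (hops + 1)

def min_hops_alt (n : Int) (routes : List (List Int)) (source : Int) (destination : Int) : Int :=
  if source = destination then 0
  else
    let str := pvBuildStrB routes
    let src := PySem.Dict.getD str source []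
    let dst := PySem.Dict.getD str destination []
    if src.isEmpty || dst.isEmpty then -1
    else
      let dstSet := PySem.Set.ofList dst
      let init := src.foldl
        (fun (s : List Int × PySem.Set Int) r =>
          if PySem.Set.contains s.2 r then s
          else (s.1 ++ [r], PySem.Set.add s.2 r)) ([], PySem.Set.empty)
      pvBfsB routes str dstSet (routes.length + 2) init.1 init.2 1

-- ===== PRECONDITION & SPEC =====
def Spec_min_hops (n : Int) (routes : List (List Int)) (source : Int) (destination : Int) (out : Int) : Prop := out = min_hops_alt n routes source destination
instance (n : Int) (routes : List (List Int)) (source : Int) (destination : Int) (out : Int) : Decidable (Spec_min_hops n routes source destination out) := by unfold Spec_min_hops; infer_instance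

-- ===== CLAIM (what is proved, stated in full; the proofs are below) =====
def Claim_equal_min_hops : Prop := ∀ (n : Int) (routes : List (List Int)) (source : Int) (destination : Int), Dom_min_hops n routes source destination → Spec_min_hops n routes source destination (min_hops n routes source destination)

-- ===== LEMMAS AND PROOFS =====

-- new elements of l relative to v, first occurrences in order
def pvNewOf (l v : List Int) : List Int :=
  (PySem.Set.ofList l).filter (fun y => !(PySem.Set.contains v y))

-- fresh elements collected while expanding a whole frontier, with running visited
def pvFresh (nbl : Int → List Int) : List Int → List Int → List Int
  | [], _ => []
  | r :: F, v => pvNewOf (nbl r) v ++ pvFresh nbl F (v ++ pvNewOf (nbl r) v)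

-- canonical level-by-level BFS on finsets
def pvLev (D : Finset Int) (Nb : Int → Finset Int) : Nat → Finset Int → Finset Int → Int → Int
  | 0, _, _, _ => -1
  | k + 1, F, V, h =>
    if F = ∅ then -1
    else if F ∩ D ≠ ∅ then h
    else pvLev D Nb k (F.biUnion Nb \ V) (V ∪ (F.biUnion Nb \ V)) (h + 1)

-- route x contains stop s
def pvOcc (routes : List (List Int)) (x s : Int) : Prop :=
  ∃ p ∈ PySem.List.enumerate routes 0, p.1 = x ∧ s ∈ p.2

-- B's neighbour multiset of route r, flattened
def pvNbl (routes : List (List Int)) (str : PySem.Dict Int (List Int)) (r : Int) : List Int :=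
  (PySem.List.pyGetD routes r []).flatMap (fun s => PySem.Dict.getD str s [])

def pvIdxs (R : Nat) : Finset Int := (List.map (fun (k : Nat) => (k : Int)) (List.range R)).toFinset

lemma pv_mem_newOf {x : Int} {l v : List Int} : x ∈ pvNewOf l v ↔ x ∈ l ∧ x ∉ v := by
  simp [pvNewOf, List.mem_filter, PySem.Set.mem_ofList]

lemma pv_nodup_newOf (l v : List Int) : (pvNewOf l v).Nodup :=
  (PySem.Set.nodup_ofList l).filter _

lemma pv_newOf_append_mem {t v : List Int} {nb : Int} (h : nb ∈ v ++ pvNewOf t v) :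
    pvNewOf (t ++ [nb]) v = pvNewOf t v := by
  unfold pvNewOf
  rw [PySem.Set.ofList_append_singleton, PySem.Set.add_eq_ite]
  by_cases hmt : nb ∈ PySem.Set.ofList t
  · rw [if_pos hmt]
  · rw [if_neg hmt, List.filter_append]
    have hv : nb ∈ v := by
      rcases List.mem_append.1 h with h' | h'
      · exact h'
      · exact absurd ((PySem.Set.mem_ofList t nb).2 (pv_mem_newOf.1 h').1) hmt
    simpa using hv

lemma pv_newOf_append_not_mem {t v : List Int} {nb : Int} (h : nb ∉ v ++ pvNewOf t v) :
    pvNewOf (t ++ [nb]) v = pvNewOf t v ++ [nb] := by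
  have hv : nb ∉ v := fun hx => h (List.mem_append.2 (Or.inl hx))
  have hmt : nb ∉ PySem.Set.ofList t := by
    intro hx
    exact h (List.mem_append.2 (Or.inr (pv_mem_newOf.2 ⟨(PySem.Set.mem_ofList t nb).1 hx, hv⟩)))
  unfold pvNewOf
  rw [PySem.Set.ofList_append_singleton, PySem.Set.add_eq_ite, if_neg hmt, List.filter_append]
  simpa using hv

lemma pv_fold_enq {β : Type} (f : Int → β) (l : List Int) (q : List β) (v : List Int) :
    l.foldl (fun (s : List β × PySem.Set Int) nb =>
        if PySem.Set.contains s.2 nb then s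
        else (s.1 ++ [f nb], PySem.Set.add s.2 nb)) (q, v)
      = (q ++ (pvNewOf l v).map f, v ++ pvNewOf l v) := by
  induction l using List.reverseRecOn with
  | nil => simp [pvNewOf, PySem.Set.ofList]
  | append_singleton t nb ih =>
    rw [List.foldl_append, ih]
    simp only [List.foldl_cons, List.foldl_nil]
    by_cases hm : nb ∈ v ++ pvNewOf t v
    · rw [if_pos ((PySem.Set.contains_iff _ nb).2 hm), pv_newOf_append_mem hm]
    · have hc : PySem.Set.contains (v ++ pvNewOf t v) nb = false := by
        by_contra hcc
        exact hm ((PySem.Set.contains_iff _ nb).1 (Bool.of_not_eq_false hcc))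
      rw [hc]
      simp only [Bool.false_eq_true, if_false]
      rw [pv_newOf_append_not_mem hm,
        PySem.Set.add_of_not_mem hm]
      simp

lemma pv_fold_enq_id (l : List Int) (q : List Int) (v : List Int) :
    l.foldl (fun (s : List Int × PySem.Set Int) nb =>
        if PySem.Set.contains s.2 nb then s
        else (s.1 ++ [nb], PySem.Set.add s.2 nb)) (q, v)
      = (q ++ pvNewOf l v, v ++ pvNewOf l v) := by
  simpa using pv_fold_enq (fun x => x) l q v

lemma pv_mem_fresh (nbl : Int → List Int) (F : List Int) :
    ∀ v x, x ∈ pvFresh nbl F v ↔ x ∉ v ∧ ∃ r ∈ F, x ∈ nbl r := by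
  induction F with
  | nil => intro v x; simp [pvFresh]
  | cons r F ih =>
    intro v x
    simp only [pvFresh, List.mem_append, ih, pv_mem_newOf, List.mem_cons]
    constructor
    · rintro (⟨hn, hv⟩ | ⟨hnv, rr, hr, hx⟩)
      · exact ⟨hv, r, Or.inl rfl, hn⟩
      · exact ⟨fun hx' => hnv (Or.inl hx'), rr, Or.inr hr, hx⟩
    · rintro ⟨hv, rr, (rfl | hr), hx⟩
      · exact Or.inl ⟨hx, hv⟩
      · by_cases hin2 : x ∈ nbl r ∧ x ∉ v
        · exact Or.inl hin2
        · exact Or.inr ⟨fun hm => hm.elim hv (fun c => hin2 c), rr, hr, hx⟩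

lemma pv_nodup_append_fresh (nbl : Int → List Int) (F : List Int) :
    ∀ v : List Int, v.Nodup → (v ++ pvFresh nbl F v).Nodup := by
  induction F with
  | nil => intro v hv; simpa [pvFresh]
  | cons r F ih =>
    intro v hv
    have h1 : (v ++ pvNewOf (nbl r) v).Nodup := by
      refine List.Nodup.append hv (pv_nodup_newOf _ _) ?_
      intro a ha hb
      exact (pv_mem_newOf.1 hb).2 ha
    have := ih (v ++ pvNewOf (nbl r) v) h1
    simpa [pvFresh, List.append_assoc] using this

lemma pv_foldl_flatMap {α β γ : Type} (l : List α) (g : α → List γ) (f : β → γ → β) (init : β) :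
    (l.flatMap g).foldl f init = l.foldl (fun a x => (g x).foldl f a) init := by
  induction l generalizing init with
  | nil => rfl
  | cons x t ih => simp [List.flatMap_cons, List.foldl_append, ih]

lemma pvBfsA_nil (graph : PySem.Dict Int (PySem.Set Int)) (dest : PySem.Set Int)
    (f : Nat) (v : PySem.Set Int) : pvBfsA graph dest f [] v = -1 := by
  cases f <;> rfl

lemma pv_fold_enqA (l : List Int) (q : List (Int × Int)) (v : List Int) (h : Int) :
    l.foldl (fun (s : List (Int × Int) × PySem.Set Int) nb =>
        if PySem.Set.contains s.2 nb then s
        else (s.1 ++ [(nb, h + 1)], PySem.Set.add s.2 nb)) (q, v)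
      = (q ++ (pvNewOf l v).map (fun r => (r, h + 1)), v ++ pvNewOf l v) := by
  simpa using pv_fold_enq (fun r => (r, h + 1)) l q v

-- one whole level of A's queue BFS
lemma pv_lemA_level (graph : PySem.Dict Int (PySem.Set Int)) (dest : PySem.Set Int)
    (F : List Int) : ∀ (N : List (Int × Int)) (v : List Int) (h : Int) (f : Nat),
    pvBfsA graph dest (F.length + f) (F.map (fun r => (r, h)) ++ N) v
      = if F.any (fun r => PySem.Set.contains dest r) then h
        else pvBfsA graph dest f
          (N ++ (pvFresh (fun r => PySem.Dict.getD graph r PySem.Set.empty) F v).map (fun r => (r, h + 1)))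
          (v ++ pvFresh (fun r => PySem.Dict.getD graph r PySem.Set.empty) F v) := by
  induction F with
  | nil =>
    intro N v h f
    simp only [List.length_nil, Nat.zero_add, List.map_nil, List.nil_append, List.any_nil,
      Bool.false_eq_true, if_false, pvFresh, List.append_nil]
  | cons r F ih =>
    intro N v h f
    have hlen : (r :: F).length + f = (F.length + f) + 1 := by
      simp [List.length_cons]; omega
    rw [hlen]
    simp only [List.map_cons, List.cons_append, pvBfsA]
    by_cases hr : PySem.Set.contains dest r = true
    · rw [if_pos hr]
      have hany : ((r :: F).any fun r => PySem.Set.contains dest r) = true := by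
        simp only [List.any_cons, hr, Bool.true_or]
      rw [if_pos hany]
    · have hrf : PySem.Set.contains dest r = false := by
        simpa using hr
      rw [hrf]
      simp only [Bool.false_eq_true, if_false]
      rw [pv_fold_enqA]
      dsimp only
      rw [List.append_assoc, ih]
      have hanyc : ((r :: F).any fun r => PySem.Set.contains dest r)
          = (F.any fun r => PySem.Set.contains dest r) := by
        simp only [List.any_cons, hrf, Bool.false_or]
      rw [hanyc]
      by_cases hany : (F.any fun r => PySem.Set.contains dest r) = true
      · rw [if_pos hany, if_pos hany]
      · rw [if_neg hany, if_neg hany]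
        rw [show pvFresh (fun r => PySem.Dict.getD graph r PySem.Set.empty) (r :: F) v
            = pvNewOf (PySem.Dict.getD graph r PySem.Set.empty) v
              ++ pvFresh (fun r => PySem.Dict.getD graph r PySem.Set.empty) F
                  (v ++ pvNewOf (PySem.Dict.getD graph r PySem.Set.empty) v) from rfl]
        simp only [List.map_append, List.append_assoc]

lemma pvLev_empty (D : Finset Int) (Nb : Int → Finset Int) (k : Nat) (V : Finset Int) (h : Int) :
    pvLev D Nb k ∅ V h = -1 := by
  cases k <;> simp [pvLev]

lemma pv_len_le_card {v : List Int} {idxs : Finset Int} (hnd : v.Nodup)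
    (hsub : ∀ r ∈ v, r ∈ idxs) : v.length ≤ idxs.card := by
  have hc : v.toFinset.card = v.length := List.toFinset_card_of_nodup hnd
  rw [← hc]
  exact Finset.card_le_card (fun x hx => hsub x (List.mem_toFinset.1 hx))

lemma pv_A2lev (graph : PySem.Dict Int (PySem.Set Int)) (dest : PySem.Set Int)
    (Nb : Int → Finset Int) (idxs : Finset Int)
    (hNbA : ∀ r x, r ∈ idxs → (x ∈ PySem.Dict.getD graph r PySem.Set.empty ↔ (x ≠ r ∧ x ∈ Nb r)))
    (hNbIdx : ∀ r x, x ∈ Nb r → x ∈ idxs) :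
    ∀ (k : Nat) (f : Nat) (F v : List Int) (h : Int),
      v.Nodup → (∀ r ∈ F, r ∈ v) → (∀ r ∈ v, r ∈ idxs) →
      F.length + idxs.card ≤ f + v.length →
      2 + idxs.card ≤ k + v.length →
      pvBfsA graph dest f (F.map (fun r => (r, h))) v
        = pvLev dest.toFinset Nb k F.toFinset v.toFinset h := by
  intro k
  induction k with
  | zero =>
    intro f F v h hnd hFv hvI hf hk
    exfalso
    have := pv_len_le_card hnd hvI
    omega
  | succ k ih =>
    intro f F v h hnd hFv hvI hf hk
    by_cases hF : F = []
    · subst hF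
      rw [List.map_nil, pvBfsA_nil]
      simp [pvLev]
    · have hlen := pv_len_le_card hnd hvI
      have hfF : F.length ≤ f := by omega
      obtain ⟨f', rfl⟩ : ∃ f', f = F.length + f' := ⟨f - F.length, by omega⟩
      have hmain := pv_lemA_level graph dest F [] v h f'
      rw [List.append_nil] at hmain
      rw [hmain]
      have hFne : ¬ F.toFinset = ∅ := by
        simpa [List.toFinset_eq_empty_iff] using hF
      by_cases hany : F.any (fun r => PySem.Set.contains dest r) = true
      · rw [if_pos hany]
        rcases List.any_eq_true.1 hany with ⟨r, hrF, hrc⟩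
        have hmem : r ∈ F.toFinset ∩ dest.toFinset :=
          Finset.mem_inter.2 ⟨List.mem_toFinset.2 hrF,
            List.mem_toFinset.2 ((PySem.Set.contains_iff _ _).1 hrc)⟩
        have hint : F.toFinset ∩ dest.toFinset ≠ ∅ := Finset.ne_empty_of_mem hmem
        simp [pvLev, hFne, hint]
      · rw [if_neg hany]
        have hint : F.toFinset ∩ dest.toFinset = ∅ := by
          rw [Finset.eq_empty_iff_forall_notMem]
          intro r hr
          rcases Finset.mem_inter.1 hr with ⟨h1, h2⟩
          exact hany (List.any_eq_true.2 ⟨r, List.mem_toFinset.1 h1,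
            (PySem.Set.contains_iff _ _).2 (List.mem_toFinset.1 h2)⟩)
        have hFRfin : (pvFresh (fun r => PySem.Dict.getD graph r PySem.Set.empty) F v).toFinset
            = F.toFinset.biUnion Nb \ v.toFinset := by
          ext x
          simp only [List.mem_toFinset, Finset.mem_sdiff, Finset.mem_biUnion,
            pv_mem_fresh]
          constructor
          · rintro ⟨hxv, r, hrF, hxg⟩
            exact ⟨⟨r, hrF, ((hNbA r x (hvI r (hFv r hrF))).1 hxg).2⟩, hxv⟩
          · rintro ⟨⟨r, hrF, hxN⟩, hxv⟩
            refine ⟨hxv, r, hrF, ?_⟩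
            exact (hNbA r x (hvI r (hFv r hrF))).2 ⟨fun he => hxv (he ▸ hFv r hrF), hxN⟩
        rw [show pvLev dest.toFinset Nb (k + 1) F.toFinset v.toFinset h
            = pvLev dest.toFinset Nb k (F.toFinset.biUnion Nb \ v.toFinset)
                (v.toFinset ∪ (F.toFinset.biUnion Nb \ v.toFinset)) (h + 1) from by
          simp only [pvLev]
          rw [if_neg hFne, if_neg (by simp [hint])]]
        by_cases hFR0 : pvFresh (fun r => PySem.Dict.getD graph r PySem.Set.empty) F v = []
        · rw [hFR0]
          simp only [List.map_nil, List.append_nil, List.nil_append]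
          rw [pvBfsA_nil]
          have hbe : F.toFinset.biUnion Nb \ v.toFinset = ∅ := by
            rw [← hFRfin, hFR0]; simp
          rw [hbe, pvLev_empty]
        · have hnd' : (v ++ pvFresh (fun r => PySem.Dict.getD graph r PySem.Set.empty) F v).Nodup :=
            pv_nodup_append_fresh _ F v hnd
          have hsub' : ∀ r ∈ v ++ pvFresh (fun r => PySem.Dict.getD graph r PySem.Set.empty) F v, r ∈ idxs := by
            intro r hrm
            rcases List.mem_append.1 hrm with hrm | hrm
            · exact hvI r hrm
            · rcases (pv_mem_fresh _ F v r).1 hrm with ⟨_, rr, hrr, hg⟩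
              exact hNbIdx rr r ((hNbA rr r (hvI rr (hFv rr hrr))).1 hg).2
          have hfr1 : 1 ≤ (pvFresh (fun r => PySem.Dict.getD graph r PySem.Set.empty) F v).length := by
            cases hfc : pvFresh (fun r => PySem.Dict.getD graph r PySem.Set.empty) F v with
            | nil => exact absurd hfc hFR0
            | cons a t => simp
          have hstep := ih f' (pvFresh (fun r => PySem.Dict.getD graph r PySem.Set.empty) F v)
            (v ++ pvFresh (fun r => PySem.Dict.getD graph r PySem.Set.empty) F v) (h + 1)
            hnd' (fun r hr => List.mem_append.2 (Or.inr hr)) hsub'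
            (by rw [List.length_append]; omega)
            (by rw [List.length_append]; omega)
          rw [List.nil_append, hstep, List.toFinset_append, hFRfin]

lemma pvBfsB_nil (routes : List (List Int)) (str : PySem.Dict Int (List Int))
    (dstSet : PySem.Set Int) (f : Nat) (v : PySem.Set Int) (h : Int) :
    pvBfsB routes str dstSet f [] v h = -1 := by
  cases f with
  | zero => rfl
  | succ f => simp [pvBfsB]

lemma pv_lemB_fold (routes : List (List Int)) (str : PySem.Dict Int (List Int))
    (F : List Int) : ∀ (q v : List Int),
    F.foldl (fun (s : List Int × PySem.Set Int) r =>
        (PySem.List.pyGetD routes r []).foldl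
          (fun (s : List Int × PySem.Set Int) stop =>
            (PySem.Dict.getD str stop []).foldl
              (fun (s : List Int × PySem.Set Int) r2 =>
                if PySem.Set.contains s.2 r2 then s
                else (s.1 ++ [r2], PySem.Set.add s.2 r2)) s) s) (q, v)
      = (q ++ pvFresh (pvNbl routes str) F v, v ++ pvFresh (pvNbl routes str) F v) := by
  induction F with
  | nil => intro q v; simp [pvFresh]
  | cons r F ih =>
    intro q v
    rw [List.foldl_cons]
    have h1 := pv_foldl_flatMap (PySem.List.pyGetD routes r [])
      (fun st => PySem.Dict.getD str st [])
      (fun (s : List Int × PySem.Set Int) r2 =>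
        if PySem.Set.contains s.2 r2 then s
        else (s.1 ++ [r2], PySem.Set.add s.2 r2)) (q, v)
    rw [← h1]
    rw [show (PySem.List.pyGetD routes r []).flatMap (fun st => PySem.Dict.getD str st [])
        = pvNbl routes str r from rfl]
    rw [pv_fold_enq_id, ih]
    rw [show pvFresh (pvNbl routes str) (r :: F) v
        = pvNewOf (pvNbl routes str r) v
          ++ pvFresh (pvNbl routes str) F (v ++ pvNewOf (pvNbl routes str r) v) from rfl]
    simp only [List.append_assoc]

lemma pv_B2lev (routes : List (List Int)) (str : PySem.Dict Int (List Int)) (dstSet : PySem.Set Int)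
    (Nb : Int → Finset Int) (idxs : Finset Int)
    (hNbB : ∀ r x, r ∈ idxs → (x ∈ pvNbl routes str r ↔ x ∈ Nb r))
    (hNbIdx : ∀ r x, x ∈ Nb r → x ∈ idxs) :
    ∀ (k : Nat) (f : Nat) (F v : List Int) (h : Int),
      v.Nodup → (∀ r ∈ F, r ∈ v) → (∀ r ∈ v, r ∈ idxs) →
      2 + idxs.card ≤ f + v.length →
      2 + idxs.card ≤ k + v.length →
      pvBfsB routes str dstSet f F v h
        = pvLev dstSet.toFinset Nb k F.toFinset v.toFinset h := by
  intro k
  induction k with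
  | zero =>
    intro f F v h hnd hFv hvI hf hk
    exfalso
    have := pv_len_le_card hnd hvI
    omega
  | succ k ih =>
    intro f F v h hnd hFv hvI hf hk
    have hlen := pv_len_le_card hnd hvI
    obtain ⟨f', rfl⟩ : ∃ f', f = f' + 1 := ⟨f - 1, by omega⟩
    by_cases hF : F = []
    · subst hF
      rw [pvBfsB_nil]
      simp [pvLev]
    · have hFe : F.isEmpty = false := by
        simpa [List.isEmpty_iff] using hF
      have hFne : ¬ F.toFinset = ∅ := by
        simpa [List.toFinset_eq_empty_iff] using hF
      simp only [pvBfsB, hFe, Bool.false_eq_true, if_false]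
      by_cases hany : F.any (fun r => PySem.Set.contains dstSet r) = true
      · rw [if_pos hany]
        rcases List.any_eq_true.1 hany with ⟨r, hrF, hrc⟩
        have hmem : r ∈ F.toFinset ∩ dstSet.toFinset :=
          Finset.mem_inter.2 ⟨List.mem_toFinset.2 hrF,
            List.mem_toFinset.2 ((PySem.Set.contains_iff _ _).1 hrc)⟩
        have hint : F.toFinset ∩ dstSet.toFinset ≠ ∅ := Finset.ne_empty_of_mem hmem
        simp [pvLev, hFne, hint]
      · rw [if_neg hany]
        have hint : F.toFinset ∩ dstSet.toFinset = ∅ := by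
          rw [Finset.eq_empty_iff_forall_notMem]
          intro r hr
          rcases Finset.mem_inter.1 hr with ⟨h1, h2⟩
          exact hany (List.any_eq_true.2 ⟨r, List.mem_toFinset.1 h1,
            (PySem.Set.contains_iff _ _).2 (List.mem_toFinset.1 h2)⟩)
        rw [pv_lemB_fold]
        dsimp only
        have hFRfin : (pvFresh (pvNbl routes str) F v).toFinset
            = F.toFinset.biUnion Nb \ v.toFinset := by
          ext x
          simp only [List.mem_toFinset, Finset.mem_sdiff, Finset.mem_biUnion, pv_mem_fresh]
          constructor
          · rintro ⟨hxv, r, hrF, hxg⟩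
            exact ⟨⟨r, hrF, (hNbB r x (hvI r (hFv r hrF))).1 hxg⟩, hxv⟩
          · rintro ⟨⟨r, hrF, hxN⟩, hxv⟩
            exact ⟨hxv, r, hrF, (hNbB r x (hvI r (hFv r hrF))).2 hxN⟩
        rw [show pvLev dstSet.toFinset Nb (k + 1) F.toFinset v.toFinset h
            = pvLev dstSet.toFinset Nb k (F.toFinset.biUnion Nb \ v.toFinset)
                (v.toFinset ∪ (F.toFinset.biUnion Nb \ v.toFinset)) (h + 1) from by
          simp only [pvLev]
          rw [if_neg hFne, if_neg (by simp [hint])]]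
        rw [List.nil_append]
        by_cases hFR0 : pvFresh (pvNbl routes str) F v = []
        · rw [hFR0, pvBfsB_nil]
          have hbe : F.toFinset.biUnion Nb \ v.toFinset = ∅ := by
            rw [← hFRfin, hFR0]; simp
          rw [hbe, pvLev_empty]
        · have hnd' : (v ++ pvFresh (pvNbl routes str) F v).Nodup :=
            pv_nodup_append_fresh _ F v hnd
          have hsub' : ∀ r ∈ v ++ pvFresh (pvNbl routes str) F v, r ∈ idxs := by
            intro r hrm
            rcases List.mem_append.1 hrm with hrm | hrm
            · exact hvI r hrm
            · rcases (pv_mem_fresh _ F v r).1 hrm with ⟨_, rr, hrr, hg⟩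
              exact hNbIdx rr r ((hNbB rr r (hvI rr (hFv rr hrr))).1 hg)
          have hfr1 : 1 ≤ (pvFresh (pvNbl routes str) F v).length := by
            cases hfc : pvFresh (pvNbl routes str) F v with
            | nil => exact absurd hfc hFR0
            | cons a t => simp
          have hstep := ih f' (pvFresh (pvNbl routes str) F v)
            (v ++ pvFresh (pvNbl routes str) F v) (h + 1)
            hnd' (fun r hr => List.mem_append.2 (Or.inr hr)) hsub'
            (by rw [List.length_append]; omega)
            (by rw [List.length_append]; omega)
          rw [hstep, List.toFinset_append, hFRfin]

-- semantics of stop_to_routes (A's set-valued version)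
lemma pv_foldl_preserve {α β : Type} (P : β → Prop) (f : β → α → β) :
    ∀ (l : List α) (init : β), (∀ b a, P b → P (f b a)) → P init → P (l.foldl f init) := by
  intro l
  induction l with
  | nil => intro init _ h0; exact h0
  | cons x t ih => intro init hstep h0; exact ih _ hstep (hstep _ _ h0)

lemma pv_strA_inner (i : Int) (stops : List Int) :
    ∀ (d : PySem.Dict Int (PySem.Set Int)) (s x : Int),
      x ∈ PySem.Dict.getD
          (stops.foldl (fun d stop =>
            PySem.Dict.modify d stop PySem.Set.empty (fun t => PySem.Set.add t i)) d) s PySem.Set.empty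
        ↔ x ∈ PySem.Dict.getD d s PySem.Set.empty ∨ (s ∈ stops ∧ x = i) := by
  induction stops with
  | nil => intro d s x; simp
  | cons st stops ih =>
    intro d s x
    rw [List.foldl_cons, ih, PySem.Dict.getD_modify]
    by_cases hs : s = st
    · rw [if_pos hs]
      simp only [PySem.Set.mem_add, List.mem_cons]
      subst hs
      tauto
    · rw [if_neg hs]
      simp only [List.mem_cons]
      tauto

lemma pv_strA_outer (L : List (Int × List Int)) :
    ∀ (d : PySem.Dict Int (PySem.Set Int)) (s x : Int),
      x ∈ PySem.Dict.getD
          (L.foldl (fun d p => p.2.foldl (fun d stop =>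
            PySem.Dict.modify d stop PySem.Set.empty (fun t => PySem.Set.add t p.1)) d) d) s PySem.Set.empty
        ↔ x ∈ PySem.Dict.getD d s PySem.Set.empty ∨ ∃ p ∈ L, p.1 = x ∧ s ∈ p.2 := by
  induction L with
  | nil => intro d s x; simp
  | cons p L ih =>
    intro d s x
    rw [List.foldl_cons, ih, pv_strA_inner]
    simp only [List.mem_cons]
    constructor
    · rintro ((hd | ⟨hsp, rfl⟩) | ⟨q, hq, hq1, hq2⟩)
      · exact Or.inl hd
      · exact Or.inr ⟨p, Or.inl rfl, rfl, hsp⟩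
      · exact Or.inr ⟨q, Or.inr hq, hq1, hq2⟩
    · rintro (hd | ⟨q, (rfl | hq), hq1, hq2⟩)
      · exact Or.inl (Or.inl hd)
      · exact Or.inl (Or.inr ⟨hq2, hq1.symm⟩)
      · exact Or.inr ⟨q, hq, hq1, hq2⟩

lemma pv_strA_mem (routes : List (List Int)) (s x : Int) :
    x ∈ PySem.Dict.getD (pvBuildStr routes) s PySem.Set.empty ↔ pvOcc routes x s := by
  unfold pvBuildStr pvOcc
  rw [pv_strA_outer]
  simp [PySem.Dict.getD_empty]

lemma pv_strA_nodup (routes : List (List Int)) (s : Int) :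
    (PySem.Dict.getD (pvBuildStr routes) s PySem.Set.empty).Nodup := by
  unfold pvBuildStr
  refine pv_foldl_preserve (fun d => ∀ s, (PySem.Dict.getD d s PySem.Set.empty).Nodup) _ _ _
    ?_ ?_ s
  · intro d p hP
    refine pv_foldl_preserve (fun d => ∀ s, (PySem.Dict.getD d s PySem.Set.empty).Nodup) _ _ _
      ?_ hP
    intro d st hP2 s'
    rw [PySem.Dict.getD_modify]
    split_ifs with h
    · exact PySem.Set.nodup_add _ _ (hP2 st)
    · exact hP2 s'
  · intro s'
    rw [PySem.Dict.getD_empty]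
    exact List.nodup_nil

lemma pv_strA_keys_nodup (routes : List (List Int)) : (pvBuildStr routes).keys.Nodup := by
  unfold pvBuildStr
  refine pv_foldl_preserve (fun (d : PySem.Dict Int (PySem.Set Int)) => d.keys.Nodup) _ _ _ ?_ ?_
  · intro d p hP
    refine pv_foldl_preserve (fun (d : PySem.Dict Int (PySem.Set Int)) => d.keys.Nodup) _ _ _ ?_ hP
    intro d st hP2
    rw [PySem.Dict.keys_modify]
    exact PySem.Dict.nodup_keys_insert _ _ _ hP2
  · exact PySem.Dict.nodup_keys_empty

-- semantics of stop_to_routes (B's list-valued version)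
lemma pv_strB_inner (i : Int) (stops : List Int) :
    ∀ (d : PySem.Dict Int (List Int)) (s x : Int),
      x ∈ PySem.Dict.getD
          (stops.foldl (fun d stop =>
            PySem.Dict.modify d stop [] (fun l => l ++ [i])) d) s []
        ↔ x ∈ PySem.Dict.getD d s [] ∨ (s ∈ stops ∧ x = i) := by
  induction stops with
  | nil => intro d s x; simp
  | cons st stops ih =>
    intro d s x
    rw [List.foldl_cons, ih, PySem.Dict.getD_modify]
    by_cases hs : s = st
    · rw [if_pos hs]
      simp only [List.mem_append, List.mem_cons]
      subst hs
      tauto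
    · rw [if_neg hs]
      simp only [List.mem_cons]
      tauto

lemma pv_strB_mem (routes : List (List Int)) (s x : Int) :
    x ∈ PySem.Dict.getD (pvBuildStrB routes) s [] ↔ pvOcc routes x s := by
  unfold pvBuildStrB pvOcc
  have houter : ∀ (L : List (Int × List Int)) (d : PySem.Dict Int (List Int)),
      x ∈ PySem.Dict.getD
          (L.foldl (fun d p => p.2.foldl (fun d stop =>
            PySem.Dict.modify d stop [] (fun l => l ++ [p.1])) d) d) s []
        ↔ x ∈ PySem.Dict.getD d s [] ∨ ∃ p ∈ L, p.1 = x ∧ s ∈ p.2 := by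
    intro L
    induction L with
    | nil => intro d; simp
    | cons p L ih =>
      intro d
      rw [List.foldl_cons, ih, pv_strB_inner]
      simp only [List.mem_cons]
      constructor
      · rintro ((hd | ⟨hsp, rfl⟩) | ⟨q, hq, hq1, hq2⟩)
        · exact Or.inl hd
        · exact Or.inr ⟨p, Or.inl rfl, rfl, hsp⟩
        · exact Or.inr ⟨q, Or.inr hq, hq1, hq2⟩
      · rintro (hd | ⟨q, (rfl | hq), hq1, hq2⟩)
        · exact Or.inl (Or.inl hd)
        · exact Or.inl (Or.inr ⟨hq2, hq1.symm⟩)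
        · exact Or.inr ⟨q, hq, hq1, hq2⟩
  rw [houter]
  simp [PySem.Dict.getD_empty]

lemma pv_occ_iff (routes : List (List Int)) (x s : Int) :
    pvOcc routes x s ↔ 0 ≤ x ∧ x < (routes.length : Int) ∧ s ∈ PySem.List.pyGetD routes x [] := by
  unfold pvOcc
  constructor
  · rintro ⟨p, hp, hp1, hp2⟩
    rcases (PySem.List.mem_enumerate_iff routes 0 p).1 hp with ⟨k, hk, rfl⟩
    simp only [Int.zero_add] at hp1 hp2 ⊢
    subst hp1
    refine ⟨by positivity, by exact_mod_cast hk, ?_⟩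
    rw [PySem.List.pyGetD_natCast, List.getD_eq_getElem _ _ hk]
    exact hp2
  · rintro ⟨h0, hlt, hmem⟩
    have hk : x.toNat < routes.length := by omega
    refine ⟨(0 + (x.toNat : Int), routes[x.toNat]),
      (PySem.List.mem_enumerate_iff routes 0 _).2 ⟨x.toNat, hk, rfl⟩, by omega, ?_⟩
    rwa [PySem.List.pyGetD_eq_getElem _ _ h0 hlt] at hmem

-- semantics of A's pairwise graph
def pvPairs (rl : List Int) : List (Int × Int) :=
  (PySem.List.pyRange 0 (rl.length : Int) 1).flatMap
    (fun i => (PySem.List.pyRange (i + 1) (rl.length : Int) 1).map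
      (fun j => (PySem.List.pyGetD rl i 0, PySem.List.pyGetD rl j 0)))

def pvPairStep (g : PySem.Dict Int (PySem.Set Int)) (p : Int × Int) : PySem.Dict Int (PySem.Set Int) :=
  PySem.Dict.modify (PySem.Dict.modify g p.1 PySem.Set.empty (fun t => PySem.Set.add t p.2))
    p.2 PySem.Set.empty (fun t => PySem.Set.add t p.1)

lemma pv_graph_item (g : PySem.Dict Int (PySem.Set Int)) (rl : List Int) :
    (PySem.List.pyRange 0 (rl.length : Int) 1).foldl
        (fun g i =>
          (PySem.List.pyRange (i + 1) (rl.length : Int) 1).foldl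
            (fun g j =>
              let a := PySem.List.pyGetD rl i 0
              let b := PySem.List.pyGetD rl j 0
              PySem.Dict.modify (PySem.Dict.modify g a PySem.Set.empty (fun t => PySem.Set.add t b))
                b PySem.Set.empty (fun t => PySem.Set.add t a)) g) g
      = (pvPairs rl).foldl pvPairStep g := by
  unfold pvPairs
  rw [pv_foldl_flatMap]
  refine PySem.List.foldl_congr_mem _ _ _ _ ?_
  intro acc i _
  rw [List.foldl_map]
  rfl

lemma pv_pairs_fold_mem (L : List (Int × Int)) :
    ∀ (g : PySem.Dict Int (PySem.Set Int)) (r x : Int),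
      x ∈ PySem.Dict.getD (L.foldl pvPairStep g) r PySem.Set.empty
        ↔ x ∈ PySem.Dict.getD g r PySem.Set.empty
            ∨ ∃ p ∈ L, (r = p.1 ∧ x = p.2) ∨ (r = p.2 ∧ x = p.1) := by
  induction L with
  | nil => intro g r x; simp
  | cons p L ih =>
    intro g r x
    rw [List.foldl_cons, ih]
    have hstep : x ∈ PySem.Dict.getD (pvPairStep g p) r PySem.Set.empty
        ↔ x ∈ PySem.Dict.getD g r PySem.Set.empty
            ∨ (r = p.1 ∧ x = p.2) ∨ (r = p.2 ∧ x = p.1) := by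
      unfold pvPairStep
      simp only [PySem.Dict.getD_modify]
      split_ifs <;> simp_all
    rw [hstep]
    simp only [List.mem_cons]
    constructor
    · rintro ((hg | hc) | ⟨q, hq, hc⟩)
      · exact Or.inl hg
      · exact Or.inr ⟨p, Or.inl rfl, hc⟩
      · exact Or.inr ⟨q, Or.inr hq, hc⟩
    · rintro (hg | ⟨q, (rfl | hq), hc⟩)
      · exact Or.inl (Or.inl hg)
      · exact Or.inl (Or.inr hc)
      · exact Or.inr ⟨q, hq, hc⟩

lemma pv_mem_pvPairs (rl : List Int) (p : Int × Int) :
    p ∈ pvPairs rl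
      ↔ ∃ i j : Int, 0 ≤ i ∧ i < j ∧ j < (rl.length : Int)
          ∧ p = (PySem.List.pyGetD rl i 0, PySem.List.pyGetD rl j 0) := by
  unfold pvPairs
  simp only [List.mem_flatMap, List.mem_map, PySem.List.mem_pyRange_one]
  constructor
  · rintro ⟨i, ⟨h0, hn⟩, j, ⟨hij, hjn⟩, rfl⟩
    exact ⟨i, j, h0, by omega, hjn, rfl⟩
  · rintro ⟨i, j, h0, hij, hjn, rfl⟩
    exact ⟨i, ⟨h0, by omega⟩, j, ⟨by omega, hjn⟩, rfl⟩

lemma pv_pairs_char (rl : List Int) (hnd : rl.Nodup) (r x : Int) :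
    (∃ p ∈ pvPairs rl, (r = p.1 ∧ x = p.2) ∨ (r = p.2 ∧ x = p.1))
      ↔ (r ∈ rl ∧ x ∈ rl ∧ x ≠ r) := by
  constructor
  · rintro ⟨p, hp, hcase⟩
    rcases (pv_mem_pvPairs rl p).1 hp with ⟨i, j, h0, hij, hj, rfl⟩
    have hj0 : (0:Int) ≤ j := by omega
    have hi : i < (rl.length : Int) := by omega
    have hgi : PySem.List.pyGetD rl i 0 = rl[i.toNat] :=
      PySem.List.pyGetD_eq_getElem rl 0 h0 hi
    have hgj : PySem.List.pyGetD rl j 0 = rl[j.toNat] :=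
      PySem.List.pyGetD_eq_getElem rl 0 hj0 hj
    have hne : rl[i.toNat] ≠ rl[j.toNat] := by
      intro he
      have := (hnd.getElem_inj_iff).1 he
      omega
    have hmi : rl[i.toNat] ∈ rl := List.getElem_mem _
    have hmj : rl[j.toNat] ∈ rl := List.getElem_mem _
    rcases hcase with ⟨rfl, rfl⟩ | ⟨rfl, rfl⟩
    · rw [hgi, hgj] at *
      exact ⟨hmi, hmj, fun he => hne he.symm⟩
    · rw [hgi, hgj] at *
      exact ⟨hmj, hmi, hne⟩
  · rintro ⟨hr, hx, hne⟩
    rcases List.mem_iff_getElem.1 hr with ⟨a, ha, hra⟩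
    rcases List.mem_iff_getElem.1 hx with ⟨b, hb, hxb⟩
    have hab : a ≠ b := by
      intro he
      subst he
      exact hne (by rw [← hxb, ← hra])
    have hga : PySem.List.pyGetD rl (a : Int) 0 = rl[a] := by
      rw [PySem.List.pyGetD_natCast, List.getD_eq_getElem _ _ ha]
    have hgb : PySem.List.pyGetD rl (b : Int) 0 = rl[b] := by
      rw [PySem.List.pyGetD_natCast, List.getD_eq_getElem _ _ hb]
    rcases Nat.lt_or_ge a b with hlt | hge
    · refine ⟨(PySem.List.pyGetD rl (a : Int) 0, PySem.List.pyGetD rl (b : Int) 0),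
        (pv_mem_pvPairs rl _).2 ⟨(a : Int), (b : Int), by positivity, by exact_mod_cast hlt,
          by exact_mod_cast hb, rfl⟩, Or.inl ?_⟩
      rw [hga, hgb, hra, hxb]
      exact ⟨rfl, rfl⟩
    · have hlt : b < a := by omega
      refine ⟨(PySem.List.pyGetD rl (b : Int) 0, PySem.List.pyGetD rl (a : Int) 0),
        (pv_mem_pvPairs rl _).2 ⟨(b : Int), (a : Int), by positivity, by exact_mod_cast hlt,
          by exact_mod_cast ha, rfl⟩, Or.inr ?_⟩
      rw [hga, hgb, hra, hxb]
      exact ⟨rfl, rfl⟩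

lemma pv_graph_fold (items : List (Int × PySem.Set Int)) :
    ∀ (g : PySem.Dict Int (PySem.Set Int)) (r x : Int),
      (∀ pr ∈ items, pr.2.Nodup) →
      (x ∈ PySem.Dict.getD
          (items.foldl
            (fun g pr =>
              (PySem.List.pyRange 0 (pr.2.length : Int) 1).foldl
                (fun g i =>
                  (PySem.List.pyRange (i + 1) (pr.2.length : Int) 1).foldl
                    (fun g j =>
                      let a := PySem.List.pyGetD pr.2 i 0
                      let b := PySem.List.pyGetD pr.2 j 0
                      PySem.Dict.modify (PySem.Dict.modify g a PySem.Set.empty (fun t => PySem.Set.add t b))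
                        b PySem.Set.empty (fun t => PySem.Set.add t a)) g) g) g) r PySem.Set.empty
        ↔ x ∈ PySem.Dict.getD g r PySem.Set.empty
            ∨ ∃ pr ∈ items, r ∈ pr.2 ∧ x ∈ pr.2 ∧ x ≠ r) := by
  induction items with
  | nil => intro g r x _; simp
  | cons pr items ih =>
    intro g r x hvals
    rw [List.foldl_cons, ih _ r x (fun q hq => hvals q (List.mem_cons_of_mem _ hq))]
    rw [pv_graph_item, pv_pairs_fold_mem,
      pv_pairs_char pr.2 (hvals pr (List.mem_cons_self)) r x]
    simp only [List.mem_cons]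
    constructor
    · rintro ((hg | hc) | ⟨q, hq, hc⟩)
      · exact Or.inl hg
      · exact Or.inr ⟨pr, Or.inl rfl, hc⟩
      · exact Or.inr ⟨q, Or.inr hq, hc⟩
    · rintro (hg | ⟨q, (rfl | hq), hc⟩)
      · exact Or.inl (Or.inl hg)
      · exact Or.inl (Or.inr hc)
      · exact Or.inr ⟨q, hq, hc⟩

lemma pv_graph_mem (routes : List (List Int)) (r x : Int) :
    x ∈ PySem.Dict.getD (pvBuildGraph (pvBuildStr routes)) r PySem.Set.empty
      ↔ x ≠ r ∧ ∃ s, pvOcc routes r s ∧ pvOcc routes x s := by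
  have hkeys := pv_strA_keys_nodup routes
  have hvals : ∀ pr ∈ (pvBuildStr routes).items, pr.2.Nodup := by
    rintro ⟨k, w⟩ hpr
    have hg := PySem.Dict.get?_of_mem_items _ hpr hkeys
    have hgd := PySem.Dict.getD_of_get?_eq_some _ PySem.Set.empty hg
    exact hgd ▸ pv_strA_nodup routes k
  unfold pvBuildGraph
  rw [pv_graph_fold _ _ r x hvals]
  rw [PySem.Dict.getD_empty]
  simp only [PySem.Set.empty, List.not_mem_nil, false_or]
  constructor
  · rintro ⟨⟨k, w⟩, hpr, hrw, hxw, hne⟩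
    have hg := PySem.Dict.get?_of_mem_items _ hpr hkeys
    have hgd := PySem.Dict.getD_of_get?_eq_some _ PySem.Set.empty hg
    refine ⟨hne, k, ?_, ?_⟩
    · rw [← pv_strA_mem]; rw [hgd]; exact hrw
    · rw [← pv_strA_mem]; rw [hgd]; exact hxw
  · rintro ⟨hne, k, hr, hx⟩
    have hrm := (pv_strA_mem routes k r).2 hr
    have hcont : (pvBuildStr routes).contains k = true := by
      by_contra hc
      have hc' : (pvBuildStr routes).contains k = false := by
        revert hc; cases (pvBuildStr routes).contains k <;> simp
      rw [PySem.Dict.getD_of_not_contains _ _ hc'] at hrm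
      simp [PySem.Set.empty] at hrm
    have hsome : ((pvBuildStr routes).get? k).isSome := by
      rw [← PySem.Dict.contains_eq_isSome_get?]; exact hcont
    rcases Option.isSome_iff_exists.1 hsome with ⟨w, hw⟩
    have hgd := PySem.Dict.getD_of_get?_eq_some _ PySem.Set.empty hw
    refine ⟨(k, w), PySem.Dict.mem_items_of_get?_eq_some _ hw, ?_, ?_, hne⟩
    · rw [← hgd]; exact hrm
    · rw [← hgd]; exact (pv_strA_mem routes k x).2 hx

lemma pv_mem_idxs (R : Nat) (x : Int) : x ∈ pvIdxs R ↔ 0 ≤ x ∧ x < (R : Int) := by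
  unfold pvIdxs
  rw [List.mem_toFinset]
  constructor
  · intro h
    rcases List.mem_map.mp h with ⟨k, hk, rfl⟩
    rw [List.mem_range] at hk
    omega
  · rintro ⟨h0, h1⟩
    exact List.mem_map.mpr ⟨x.toNat, List.mem_range.mpr (by omega), by omega⟩

lemma pv_card_idxs (R : Nat) : (pvIdxs R).card = R := by
  unfold pvIdxs
  rw [List.toFinset_card_of_nodup
    (List.Nodup.map (fun a b h => by simpa using h) List.nodup_range),
    List.length_map, List.length_range]

lemma pv_newOf_nil_right (l : List Int) : pvNewOf l [] = PySem.Set.ofList l := by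
  unfold pvNewOf
  apply List.filter_eq_self.2
  intro a _
  simp

lemma pv_nb_iff (routes : List (List Int)) (r x : Int)
    (h0 : 0 ≤ r) (h1 : r < (routes.length : Int)) :
    x ∈ pvNbl routes (pvBuildStrB routes) r ↔ ∃ s, pvOcc routes r s ∧ pvOcc routes x s := by
  unfold pvNbl
  simp only [List.mem_flatMap, pv_strB_mem]
  constructor
  · rintro ⟨s, hs, hx⟩
    exact ⟨s, (pv_occ_iff routes r s).2 ⟨h0, h1, hs⟩, hx⟩
  · rintro ⟨s, hr, hx⟩
    exact ⟨s, ((pv_occ_iff routes r s).1 hr).2.2, hx⟩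

-- ===== VERDICT (by name: the statement is the Claim_ definition above) =====
theorem min_hops_spec : Claim_equal_min_hops := by
  intro n routes source destination _
  unfold Spec_min_hops min_hops min_hops_alt
  dsimp only
  by_cases hsd : source = destination
  · rw [if_pos hsd, if_pos hsd]
  · rw [if_neg hsd, if_neg hsd]
    have hiffnil : ∀ y : Int,
        PySem.Dict.getD (pvBuildStr routes) y PySem.Set.empty = []
          ↔ PySem.Dict.getD (pvBuildStrB routes) y [] = [] := by
      intro y
      rw [List.eq_nil_iff_forall_not_mem, List.eq_nil_iff_forall_not_mem]
      constructor
      · intro h x hx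
        exact h x ((pv_strA_mem routes y x).2 ((pv_strB_mem routes y x).1 hx))
      · intro h x hx
        exact h x ((pv_strB_mem routes y x).2 ((pv_strA_mem routes y x).1 hx))
    by_cases hempty : PySem.Dict.getD (pvBuildStr routes) source PySem.Set.empty = []
        ∨ PySem.Dict.getD (pvBuildStr routes) destination PySem.Set.empty = []
    · have h1 : ((PySem.Dict.getD (pvBuildStr routes) source PySem.Set.empty).isEmpty
          || (PySem.Dict.getD (pvBuildStr routes) destination PySem.Set.empty).isEmpty) = true := by
        rcases hempty with h | h <;> rw [h] <;> simp
      have h2 : ((PySem.Dict.getD (pvBuildStrB routes) source []).isEmpty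
          || (PySem.Dict.getD (pvBuildStrB routes) destination []).isEmpty) = true := by
        rcases hempty with h | h
        · rw [(hiffnil source).1 h]; simp
        · rw [(hiffnil destination).1 h]; simp
      rw [if_pos h1, if_pos h2]
    · rw [not_or] at hempty
      obtain ⟨hsne, hdne⟩ := hempty
      have hsneB : PySem.Dict.getD (pvBuildStrB routes) source [] ≠ [] :=
        fun h => hsne ((hiffnil source).2 h)
      have hdneB : PySem.Dict.getD (pvBuildStrB routes) destination [] ≠ [] :=
        fun h => hdne ((hiffnil destination).2 h)
      have h1 : ((PySem.Dict.getD (pvBuildStr routes) source PySem.Set.empty).isEmpty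
          || (PySem.Dict.getD (pvBuildStr routes) destination PySem.Set.empty).isEmpty) = false := by
        simp only [Bool.or_eq_false_iff]
        constructor <;> rw [List.isEmpty_eq_false_iff_exists_mem]
        · exact List.exists_mem_of_ne_nil _ hsne
        · exact List.exists_mem_of_ne_nil _ hdne
      have h2 : ((PySem.Dict.getD (pvBuildStrB routes) source []).isEmpty
          || (PySem.Dict.getD (pvBuildStrB routes) destination []).isEmpty) = false := by
        simp only [Bool.or_eq_false_iff]
        constructor <;> rw [List.isEmpty_eq_false_iff_exists_mem]
        · exact List.exists_mem_of_ne_nil _ hsneB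
        · exact List.exists_mem_of_ne_nil _ hdneB
      rw [h1, h2]
      simp only [Bool.false_eq_true, if_false]
      -- name the pieces
      set srcA := PySem.Dict.getD (pvBuildStr routes) source PySem.Set.empty with hsrcA
      set dstA := PySem.Dict.getD (pvBuildStr routes) destination PySem.Set.empty with hdstA
      set srcB := PySem.Dict.getD (pvBuildStrB routes) source [] with hsrcB
      set dstB := PySem.Dict.getD (pvBuildStrB routes) destination [] with hdstB
      set Nb := fun r => (pvNbl routes (pvBuildStrB routes) r).toFinset with hNb
      set idxs := pvIdxs routes.length with hidxs
      -- A's initialisation loop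
      have hinitA : srcA.foldl
          (fun (s : List (Int × Int) × PySem.Set Int) r =>
            (s.1 ++ [(r, 1)], PySem.Set.add s.2 r)) ([], PySem.Set.empty)
          = (srcA.map (fun r => (r, (1 : Int))), srcA) := by
        rw [PySem.List.foldl_prod_mk (f := fun (q : List (Int × Int)) (r : Int) => q ++ [(r, (1 : Int))])
          (g := fun (v : PySem.Set Int) (r : Int) => PySem.Set.add v r)]
        rw [PySem.List.foldl_append_singleton_eq_map]
        rw [show srcA.foldl PySem.Set.add PySem.Set.empty = PySem.Set.ofList srcA from
          (PySem.Set.ofList_eq_foldl srcA).symm]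
        have hndA : srcA.Nodup := by rw [hsrcA]; exact pv_strA_nodup routes source
        rw [PySem.Set.ofList_eq_self_of_nodup _ hndA]
        simp
      -- B's initialisation loop
      have hinitB : srcB.foldl
          (fun (s : List Int × PySem.Set Int) r =>
            if PySem.Set.contains s.2 r then s
            else (s.1 ++ [r], PySem.Set.add s.2 r)) ([], PySem.Set.empty)
          = (PySem.Set.ofList srcB, PySem.Set.ofList srcB) := by
        rw [show ((([] : List Int), PySem.Set.empty) : List Int × PySem.Set Int)
            = (([] : List Int), ([] : List Int)) from rfl]
        rw [pv_fold_enq_id srcB [] []]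
        rw [pv_newOf_nil_right]
        simp
      rw [hinitA, hinitB]
      dsimp only
      -- neighbour hypotheses
      have hNbIdx : ∀ r x, x ∈ Nb r → x ∈ idxs := by
        intro r x hx
        rw [hNb] at hx
        rcases List.mem_flatMap.1 (List.mem_toFinset.1 hx) with ⟨s, _, hxs⟩
        have := (pv_occ_iff routes x s).1 ((pv_strB_mem routes s x).1 hxs)
        rw [hidxs, pv_mem_idxs]
        exact ⟨this.1, this.2.1⟩
      have hNbA : ∀ r x, r ∈ idxs →
          (x ∈ PySem.Dict.getD (pvBuildGraph (pvBuildStr routes)) r PySem.Set.empty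
            ↔ (x ≠ r ∧ x ∈ Nb r)) := by
        intro r x hr
        rw [hidxs, pv_mem_idxs] at hr
        rw [pv_graph_mem, hNb]
        dsimp only
        rw [List.mem_toFinset, pv_nb_iff routes r x hr.1 hr.2]
      have hNbB : ∀ r x, r ∈ idxs →
          (x ∈ pvNbl routes (pvBuildStrB routes) r ↔ x ∈ Nb r) := by
        intro r x _
        rw [hNb]
        dsimp only
        rw [List.mem_toFinset]
      have hsubA : ∀ r ∈ srcA, r ∈ idxs := by
        intro r hrm
        have := (pv_occ_iff routes r source).1 ((pv_strA_mem routes source r).1 hrm)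
        rw [hidxs, pv_mem_idxs]
        exact ⟨this.1, this.2.1⟩
      have hsubB : ∀ r ∈ PySem.Set.ofList srcB, r ∈ idxs := by
        intro r hrm
        have hrm' := (PySem.Set.mem_ofList srcB r).1 hrm
        have := (pv_occ_iff routes r source).1 ((pv_strB_mem routes source r).1 hrm')
        rw [hidxs, pv_mem_idxs]
        exact ⟨this.1, this.2.1⟩
      have hcard : idxs.card = routes.length := by rw [hidxs, pv_card_idxs]
      -- both sides equal the canonical level BFS
      have hA := pv_A2lev (pvBuildGraph (pvBuildStr routes)) dstA Nb idxs hNbA hNbIdx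
        (idxs.card + 2) (routes.length + 1) srcA srcA 1
        (pv_strA_nodup routes source) (fun r hr => hr) hsubA
        (by omega) (by omega)
      have hB := pv_B2lev routes (pvBuildStrB routes) (PySem.Set.ofList dstB) Nb idxs hNbB hNbIdx
        (idxs.card + 2) (routes.length + 2) (PySem.Set.ofList srcB) (PySem.Set.ofList srcB) 1
        (PySem.Set.nodup_ofList srcB) (fun r hr => hr) hsubB
        (by omega) (by omega)
      rw [hA, hB]
      have hsrcfin : srcA.toFinset = (PySem.Set.ofList srcB).toFinset := by
        ext x
        simp only [List.mem_toFinset, PySem.Set.mem_ofList, hsrcA, hsrcB,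
          pv_strA_mem, pv_strB_mem]
      have hdstfin : dstA.toFinset = (PySem.Set.ofList dstB).toFinset := by
        ext x
        simp only [List.mem_toFinset, PySem.Set.mem_ofList, hdstA, hdstB,
          pv_strA_mem, pv_strB_mem]
      rw [hsrcfin, hdstfin]
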